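-- pv_equiv track=rewrite | github.com/vbnm95/dagr-web | api/dagr_bit_align.py | select_domains_exact_bit
-- ===== SOURCE A (Python) =====
-- import itertools
-- import math
-- from typing import Dict, List, Optional, Sequence, Tuple
--
-- def mask_popcount(mask: int) -> int:
--     return mask.bit_count()
--
-- def union_masks(masks: Sequence[int]) -> int:
--     out = 0
--     for m in masks:
--         out |= m
--     return out
--
-- def overlap_union_mask(masks: Sequence[int]) -> int:
--     out = 0
--     for i in range(len(masks)):
--         for j in range(i + 1, len(masks)):
--             out |= masks[i] & masks[j]
--     return out
--
-- def score_domains(domains: Sequence[int]) -> Tuple[int, int]: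
--     """
--     higher is better:
--       coverage 최대
--       overlap(hinge) 최소
--     """
--     covered = union_masks(domains)
--     hinge = overlap_union_mask(domains)
--     return (mask_popcount(covered), -mask_popcount(hinge))
--
-- def select_domains_exact_bit(
--     candidate_domains: Sequence[int],
--     n_domains: int,
--     max_exact_combinations: Optional[int] = 10_000_000,
-- ) -> List[int]:
--     if n_domains <= 0:
--         raise ValueError("n_domains must be positive for exact mode.")
--
--     if n_domains > len(candidate_domains):
--         raise ValueError(
--             f"n_domains={n_domains} cannot exceed number of candidate domains ({len(candidate_domains)})."
--         )
--
--     n_combinations = math.comb(len(candidate_domains), n_domains)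
--
--     if max_exact_combinations is not None and n_combinations > max_exact_combinations:
--         raise ValueError(
--             f"Exact search would require {n_combinations} combinations, "
--             f"which exceeds max_exact_combinations={max_exact_combinations}."
--         )
--
--     best_combo = None
--     best_score = None
--
--     for combo in itertools.combinations(candidate_domains, n_domains):
--         score = score_domains(combo)
--         if best_score is None or score > best_score:
--             best_score = score
--             best_combo = combo
--
--     return list(best_combo) if best_combo is not None else []
-- ===== SOURCE B (Python) =====
-- import itertools
-- import math
-- from typing import List, Optional, Sequence
--
--
-- def select_domains_exact_bit(
--     candidate_domains: Sequence[int],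
--     n_domains: int,
--     max_exact_combinations: Optional[int] = 10_000_000,
-- ) -> List[int]:
--     if n_domains <= 0:
--         raise ValueError("n_domains must be positive for exact mode.")
--
--     if n_domains > len(candidate_domains):
--         raise ValueError(
--             f"n_domains={n_domains} cannot exceed number of candidate domains ({len(candidate_domains)})."
--         )
--
--     n_combinations = math.comb(len(candidate_domains), n_domains)
--
--     if max_exact_combinations is not None and n_combinations > max_exact_combinations:
--         raise ValueError(
--             f"Exact search would require {n_combinations} combinations, "
--             f"which exceeds max_exact_combinations={max_exact_combinations}."
--         )
--
--     def score(combo):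
--         # one linear sweep: coverage of the union, overlap = bits seen at least twice
--         acc = 0
--         overlap = 0
--         for m in combo:
--             overlap |= acc & m
--             acc |= m
--         return (acc.bit_count(), -overlap.bit_count())
--
--     # max() keeps the first combination attaining the maximal score,
--     # exactly like A's strict '>' update rule.
--     return list(max(itertools.combinations(candidate_domains, n_domains), key=score))
-- ===== Notes on version B (the rewrite author's own statement) =====
-- stated objective: alternative
-- what changed: B replaces A's two separate scoring passes per combination (union fold plus an O(k^2) nested index loop for pairwise overlap) by a single linear sweep carrying (acc, overlap) with overlap |= acc & m, and tracks the winner with max(..., key=score) instead of A's explicit best_combo/best_score accumulator loop.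
import Mathlib
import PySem

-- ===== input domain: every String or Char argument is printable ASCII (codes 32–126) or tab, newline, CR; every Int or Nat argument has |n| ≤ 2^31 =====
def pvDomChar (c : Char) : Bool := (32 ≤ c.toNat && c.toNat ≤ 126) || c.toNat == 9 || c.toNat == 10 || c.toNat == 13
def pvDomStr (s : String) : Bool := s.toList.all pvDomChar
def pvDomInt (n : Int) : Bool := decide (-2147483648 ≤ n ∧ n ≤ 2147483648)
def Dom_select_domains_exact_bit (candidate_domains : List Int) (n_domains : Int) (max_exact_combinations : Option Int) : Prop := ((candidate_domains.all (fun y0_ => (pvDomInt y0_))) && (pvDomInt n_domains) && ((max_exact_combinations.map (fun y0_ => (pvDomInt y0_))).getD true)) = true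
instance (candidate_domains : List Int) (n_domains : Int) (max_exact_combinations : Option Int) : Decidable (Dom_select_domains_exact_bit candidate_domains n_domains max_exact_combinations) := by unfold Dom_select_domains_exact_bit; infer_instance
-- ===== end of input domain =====

-- B replaces A's separate union pass and O(k^2) pairwise-overlap pass per combination by one
-- linear sweep carrying (acc, overlap), and tracks the winner with max(..., key=score);
-- same exhaustive enumeration, same first-maximum tie-breaking (objective: alternative).

-- Python tuple comparison '>' on int pairs (language primitive, shared by both ports)
def pyPairGT (a b : Int × Int) : Bool := a.1 > b.1 || (a.1 == b.1 && a.2 > b.2)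

-- ===== PORT A =====
def mask_popcount (mask : Int) : Int := (PySem.Int.bitCount mask : Int)

def union_masks (masks : List Int) : Int :=
  masks.foldl (fun out m => PySem.Int.bor out m) 0

def overlap_union_mask (masks : List Int) : Int :=
  (List.range masks.length).foldl
    (fun out i =>
      (List.range' (i + 1) (masks.length - (i + 1))).foldl
        (fun out j => PySem.Int.bor out (PySem.Int.band (masks.getD i 0) (masks.getD j 0))) out)
    0

def score_domains (domains : List Int) : Int × Int :=
  (mask_popcount (union_masks domains), -(mask_popcount (overlap_union_mask domains)))

-- loop body of A's best-combo search: state = (best_combo, best_score)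
def selStep (st : Option (List Int) × Option (Int × Int)) (combo : List Int) :
    Option (List Int) × Option (Int × Int) :=
  let score := score_domains combo
  match st.2 with
  | none => (some combo, some score)
  | some bs => if pyPairGT score bs then (some combo, some score) else st

def select_domains_exact_bit (candidate_domains : List Int) (n_domains : Int) (max_exact_combinations : Option Int) : List Int :=
  if n_domains ≤ 0 then []            -- Python: raise ValueError (excluded by Pre_)
  else if n_domains > (candidate_domains.length : Int) then []   -- raise ValueError (excluded by Pre_)
  else
    let n_combinations : Int := (Nat.choose candidate_domains.length n_domains.toNat : Int)  -- math.comb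
    if (match max_exact_combinations with
        | some m => decide (n_combinations > m)
        | none => false) then []      -- raise ValueError (excluded by Pre_)
    else
      let st := (PySem.List.combinations candidate_domains n_domains.toNat).foldl selStep (none, none)
      match st.1 with
      | some c => c
      | none => []

-- ===== PORT B =====
-- one linear sweep: coverage of the union, overlap = bits seen at least twice
def altScore (combo : List Int) : Int × Int :=
  let p := combo.foldl
    (fun (s : Int × Int) m => (PySem.Int.bor s.1 m, PySem.Int.bor s.2 (PySem.Int.band s.1 m)))
    ((0 : Int), (0 : Int))
  ((PySem.Int.bitCount p.1 : Int), -((PySem.Int.bitCount p.2 : Int)))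

-- step of max(combos, key=altScore): keep the first combination with maximal key
def bestStep (best x : List Int) : List Int :=
  if pyPairGT (altScore x) (altScore best) then x else best

def select_domains_exact_bit_alt (candidate_domains : List Int) (n_domains : Int) (max_exact_combinations : Option Int) : List Int :=
  if n_domains ≤ 0 then []            -- Python: raise ValueError (excluded by Pre_)
  else if n_domains > (candidate_domains.length : Int) then []   -- raise ValueError (excluded by Pre_)
  else if (match max_exact_combinations with
           | some m => decide ((Nat.choose candidate_domains.length n_domains.toNat : Int) > m)
           | none => false) then []   -- raise ValueError (excluded by Pre_)
  else
    match PySem.List.combinations candidate_domains n_domains.toNat with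
    | [] => []                        -- unreachable under Pre_ (max of a nonempty iterator)
    | c :: rest => rest.foldl bestStep c

-- ===== PRECONDITION & SPEC =====
-- Pre_ excludes exactly the three inputs classes on which the Python raises ValueError:
-- n_domains ≤ 0, n_domains > len(candidate_domains), and comb(len, n) > max_exact_combinations.
def Pre_select_domains_exact_bit (candidate_domains : List Int) (n_domains : Int) (max_exact_combinations : Option Int) : Prop :=
  0 < n_domains ∧ n_domains ≤ (candidate_domains.length : Int) ∧
    ∀ m ∈ max_exact_combinations, (Nat.choose candidate_domains.length n_domains.toNat : Int) ≤ m
instance (candidate_domains : List Int) (n_domains : Int) (max_exact_combinations : Option Int) : Decidable (Pre_select_domains_exact_bit candidate_domains n_domains max_exact_combinations) := by unfold Pre_select_domains_exact_bit; infer_instance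

def pvWitness_select_domains_exact_bit : List Int × Int × Option Int := ([3, 5, 6], 2, some 10000000)

def Spec_select_domains_exact_bit (candidate_domains : List Int) (n_domains : Int) (max_exact_combinations : Option Int) (out : List Int) : Prop := out = select_domains_exact_bit_alt candidate_domains n_domains max_exact_combinations
instance (candidate_domains : List Int) (n_domains : Int) (max_exact_combinations : Option Int) (out : List Int) : Decidable (Spec_select_domains_exact_bit candidate_domains n_domains max_exact_combinations out) := by unfold Spec_select_domains_exact_bit; infer_instance

-- ===== CLAIM (what is proved, stated in full; the proofs are below) =====
def Claim_equal_select_domains_exact_bit : Prop := ∀ (candidate_domains : List Int) (n_domains : Int) (max_exact_combinations : Option Int), Dom_select_domains_exact_bit candidate_domains n_domains max_exact_combinations → Pre_select_domains_exact_bit candidate_domains n_domains max_exact_combinations → Spec_select_domains_exact_bit candidate_domains n_domains max_exact_combinations (select_domains_exact_bit candidate_domains n_domains max_exact_combinations)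

-- ===== LEMMAS AND PROOFS =====

-- ---- bit layer: a testBit characterisation of PySem.Int.bor / band ----

theorem intTestBitExt (a b : Int) (h : ∀ k, a.testBit k = b.testBit k) : a = b := by
  cases a with
  | ofNat m =>
    cases b with
    | ofNat n =>
      congr 1
      exact Nat.eq_of_testBit_eq (fun k => h k)
    | negSucc n =>
      exfalso
      have hk := h (m + n)
      have hm : m.testBit (m + n) = false :=
        Nat.testBit_lt_two_pow (lt_of_lt_of_le (Nat.lt_two_pow_self) (Nat.pow_le_pow_right (by norm_num) (Nat.le_add_right m n)))
      have hn : n.testBit (m + n) = false :=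
        Nat.testBit_lt_two_pow (lt_of_lt_of_le (Nat.lt_two_pow_self) (Nat.pow_le_pow_right (by norm_num) (Nat.le_add_left n m)))
      rw [show (Int.ofNat m).testBit (m+n) = m.testBit (m+n) from rfl,
          show (Int.negSucc n).testBit (m+n) = !(n.testBit (m+n)) from rfl, hm, hn] at hk
      simp at hk
  | negSucc m =>
    cases b with
    | ofNat n =>
      exfalso
      have hk := h (m + n)
      have hm : m.testBit (m + n) = false :=
        Nat.testBit_lt_two_pow (lt_of_lt_of_le (Nat.lt_two_pow_self) (Nat.pow_le_pow_right (by norm_num) (Nat.le_add_right m n)))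
      have hn : n.testBit (m + n) = false :=
        Nat.testBit_lt_two_pow (lt_of_lt_of_le (Nat.lt_two_pow_self) (Nat.pow_le_pow_right (by norm_num) (Nat.le_add_left n m)))
      rw [show (Int.negSucc m).testBit (m+n) = !(m.testBit (m+n)) from rfl,
          show (Int.ofNat n).testBit (m+n) = n.testBit (m+n) from rfl, hm, hn] at hk
      simp at hk
    | negSucc n =>
      congr 1
      refine Nat.eq_of_testBit_eq (fun k => ?_)
      have hk := h k
      rw [show (Int.negSucc m).testBit k = !(m.testBit k) from rfl,
          show (Int.negSucc n).testBit k = !(n.testBit k) from rfl] at hk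
      cases hm : m.testBit k <;> cases hn : n.testBit k <;> simp_all

theorem nat_disj_add (a b : Nat) (h : a &&& b = 0) : a + b = a ||| b := by
  induction a using Nat.strongRecOn generalizing b with
  | _ a ih =>
    rcases Nat.eq_zero_or_pos a with ha | ha
    · simp [ha]
    · have h2 : a / 2 &&& b / 2 = 0 := by
        rw [← Nat.and_div_two, h]
      have ihh := ih (a / 2) (Nat.div_lt_self ha (by norm_num)) (b / 2) h2
      have hpar : ¬ (a % 2 = 1 ∧ b % 2 = 1) := by
        rintro ⟨h1, h2'⟩
        have := congrArg (fun x => x.testBit 0) h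
        simp [Nat.testBit_zero, h1, h2'] at this
      have hor2 : (a ||| b) / 2 = a / 2 ||| b / 2 := Nat.or_div_two
      have horm : (a ||| b) % 2 = a % 2 + b % 2 := by
        have hiff := Nat.or_mod_two_eq_one (a := a) (b := b)
        rcases Nat.mod_two_eq_zero_or_one a with h1 | h1 <;>
        rcases Nat.mod_two_eq_zero_or_one b with h2'' | h2''
        · have hx : (a ||| b) % 2 ≠ 1 := fun hx => by
            rcases hiff.mp hx with hh | hh <;> omega
          omega
        · have hx : (a ||| b) % 2 = 1 := hiff.mpr (Or.inr h2'')
          omega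
        · have hx : (a ||| b) % 2 = 1 := hiff.mpr (Or.inl h1)
          omega
        · exact absurd ⟨h1, h2''⟩ hpar
      omega

theorem nat_sub_and (n m : Nat) : n - (n &&& m) = Nat.ldiff n m := by
  have hdisj : (n &&& m) &&& Nat.ldiff n m = 0 := by
    apply Nat.eq_of_testBit_eq; intro k
    simp [Nat.testBit_ldiff, Nat.testBit_and]
    cases n.testBit k <;> cases m.testBit k <;> simp
  have hor : (n &&& m) ||| Nat.ldiff n m = n := by
    apply Nat.eq_of_testBit_eq; intro k
    simp [Nat.testBit_ldiff, Nat.testBit_or, Nat.testBit_and]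
    cases n.testBit k <;> cases m.testBit k <;> simp
  have := nat_disj_add _ _ hdisj
  omega

theorem tb_negLit (x : Nat) (k : Nat) : (-(x : Int) - 1).testBit k = !(x.testBit k) := by
  have : -(x : Int) - 1 = Int.negSucc x := by
    rw [Int.negSucc_eq]; ring
  rw [this]
  rfl

theorem tb_natCast (n : Nat) (k : Nat) : ((n : Int)).testBit k = n.testBit k := rfl

theorem tb_nonneg (a : Int) (ha : 0 ≤ a) (k : Nat) : a.testBit k = a.toNat.testBit k := by
  conv_lhs => rw [← Int.toNat_of_nonneg ha]
  rfl

theorem tb_neg (a : Int) (ha : ¬ 0 ≤ a) (k : Nat) :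
    a.testBit k = !(((-a).toNat - 1).testBit k) := by
  have h : a = -((((-a).toNat - 1 : Nat) : Int)) - 1 := by omega
  conv_lhs => rw [h]
  rw [tb_negLit]

theorem tb_bor (a b : Int) (k : Nat) :
    (PySem.Int.bor a b).testBit k = (a.testBit k || b.testBit k) := by
  unfold PySem.Int.bor
  by_cases ha : 0 ≤ a <;> by_cases hb : 0 ≤ b
  · rw [if_pos ha, if_pos hb, tb_nonneg a ha, tb_nonneg b hb, tb_natCast, Nat.testBit_or]
  · have hc : (-b - 1).toNat = (-b).toNat - 1 := by omega
    rw [if_pos ha, if_neg hb, hc, tb_negLit, nat_sub_and, Nat.testBit_ldiff,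
        tb_nonneg a ha, tb_neg b hb]
    cases a.toNat.testBit k <;> cases ((-b).toNat - 1).testBit k <;> rfl
  · have hc : (-a - 1).toNat = (-a).toNat - 1 := by omega
    rw [if_neg ha, if_pos hb, hc, tb_negLit, nat_sub_and, Nat.testBit_ldiff,
        tb_nonneg b hb, tb_neg a ha]
    cases b.toNat.testBit k <;> cases ((-a).toNat - 1).testBit k <;> rfl
  · have hc1 : (-a - 1).toNat = (-a).toNat - 1 := by omega
    have hc2 : (-b - 1).toNat = (-b).toNat - 1 := by omega
    rw [if_neg ha, if_neg hb, hc1, hc2, tb_negLit, Nat.testBit_and, tb_neg a ha, tb_neg b hb]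
    cases ((-a).toNat - 1).testBit k <;> cases ((-b).toNat - 1).testBit k <;> rfl

theorem tb_band (a b : Int) (k : Nat) :
    (PySem.Int.band a b).testBit k = (a.testBit k && b.testBit k) := by
  unfold PySem.Int.band
  by_cases ha : 0 ≤ a <;> by_cases hb : 0 ≤ b
  · rw [if_pos ha, if_pos hb, tb_nonneg a ha, tb_nonneg b hb, tb_natCast, Nat.testBit_and]
  · have hc : (-b - 1).toNat = (-b).toNat - 1 := by omega
    rw [if_pos ha, if_neg hb, tb_natCast, hc, nat_sub_and, Nat.testBit_ldiff,
        tb_nonneg a ha, tb_neg b hb]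
  · have hc : (-a - 1).toNat = (-a).toNat - 1 := by omega
    rw [if_neg ha, if_pos hb, tb_natCast, hc, nat_sub_and, Nat.testBit_ldiff,
        tb_nonneg b hb, tb_neg a ha]
    cases b.toNat.testBit k <;> cases ((-a).toNat - 1).testBit k <;> rfl
  · have hc1 : (-a - 1).toNat = (-a).toNat - 1 := by omega
    have hc2 : (-b - 1).toNat = (-b).toNat - 1 := by omega
    rw [if_neg ha, if_neg hb, hc1, hc2, tb_negLit, Nat.testBit_or, tb_neg a ha, tb_neg b hb]
    cases ((-a).toNat - 1).testBit k <;> cases ((-b).toNat - 1).testBit k <;> rfl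

theorem bor_assoc (a b c : Int) :
    PySem.Int.bor (PySem.Int.bor a b) c = PySem.Int.bor a (PySem.Int.bor b c) := by
  apply intTestBitExt; intro k; simp [tb_bor, Bool.or_assoc]

theorem band_bor_distrib (a x y : Int) :
    PySem.Int.band (PySem.Int.bor a x) y =
      PySem.Int.bor (PySem.Int.band a y) (PySem.Int.band x y) := by
  apply intTestBitExt; intro k; simp [tb_bor, tb_band]
  cases a.testBit k <;> cases x.testBit k <;> cases y.testBit k <;> simp

def pairAux : List Int → Int → Int
  | [], out => out
  | x :: t, out =>
      pairAux t (t.foldl (fun o y => PySem.Int.bor o (PySem.Int.band x y)) out)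

theorem foldl_range_getD (t : List Int) (f : Int → Int → Int) (out : Int) :
    (List.range t.length).foldl (fun o j => f o (t.getD j 0)) out = t.foldl f out := by
  induction t generalizing out with
  | nil => rfl
  | cons x s ih =>
    rw [List.length_cons, List.range_succ_eq_map, List.foldl_cons, List.foldl_map]
    simpa using ih (f out x)

theorem range'_shift (n s : Nat) : List.range' (s + 1) n = (List.range' s n).map (· + 1) := by
  induction n generalizing s with
  | zero => rfl
  | succ m ih =>
    rw [List.range'_succ, List.range'_succ, List.map_cons, ih]

theorem overlapAux_eq_pairAux (l : List Int) (out : Int) :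
    (List.range l.length).foldl
      (fun o i =>
        (List.range' (i + 1) (l.length - (i + 1))).foldl
          (fun o j => PySem.Int.bor o (PySem.Int.band (l.getD i 0) (l.getD j 0))) o)
      out = pairAux l out := by
  induction l generalizing out with
  | nil => rfl
  | cons x t ih =>
    rw [List.length_cons, List.range_succ_eq_map, List.foldl_cons, List.foldl_map]
    have hrow :
        (List.range' (0 + 1) (t.length + 1 - (0 + 1))).foldl
          (fun o j => PySem.Int.bor o (PySem.Int.band ((x :: t).getD 0 0) ((x :: t).getD j 0))) out
          = t.foldl (fun o y => PySem.Int.bor o (PySem.Int.band x y)) out := by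
      rw [show (0 + 1) = 1 by rfl, Nat.add_sub_cancel, range'_shift, List.foldl_map]
      rw [show List.range' 0 t.length = List.range t.length from (List.range_eq_range' ..).symm]
      rw [← foldl_range_getD t (fun o y => PySem.Int.bor o (PySem.Int.band x y)) out]
      apply PySem.List.foldl_congr_mem
      intro o j hj
      simp
    rw [hrow]
    have hshift : ∀ (o : Int) (i : Nat),
        (List.range' (i + 1 + 1) (t.length + 1 - (i + 1 + 1))).foldl
          (fun o j => PySem.Int.bor o (PySem.Int.band ((x :: t).getD (i + 1) 0) ((x :: t).getD j 0))) o
          = (List.range' (i + 1) (t.length - (i + 1))).foldl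
              (fun o j => PySem.Int.bor o (PySem.Int.band (t.getD i 0) (t.getD j 0))) o := by
      intro o i
      rw [Nat.succ_sub_succ, range'_shift, List.foldl_map]
      apply PySem.List.foldl_congr_mem
      intro o j hj
      simp
    rw [show (fun (o : Int) (i : Nat) =>
        (List.range' (i + 1 + 1) (t.length + 1 - (i + 1 + 1))).foldl
          (fun o j => PySem.Int.bor o (PySem.Int.band ((x :: t).getD (i + 1) 0) ((x :: t).getD j 0))) o)
        = (fun (o : Int) (i : Nat) =>
        (List.range' (i + 1) (t.length - (i + 1))).foldl
          (fun o j => PySem.Int.bor o (PySem.Int.band (t.getD i 0) (t.getD j 0))) o)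
      from funext fun o => funext fun i => hshift o i]
    exact ih _

theorem foldl_bor_pull (t : List Int) (h : Int → Int) (init : Int) :
    t.foldl (fun u y => PySem.Int.bor u (h y)) init =
      PySem.Int.bor init (t.foldl (fun u y => PySem.Int.bor u (h y)) 0) := by
  induction t generalizing init with
  | nil => simp [PySem.Int.bor_zero]
  | cons x s ih =>
    rw [List.foldl_cons, List.foldl_cons, ih (PySem.Int.bor init (h x)),
        ih (PySem.Int.bor 0 (h x)), bor_assoc]
    rw [show PySem.Int.bor 0 (h x) = h x from by
      rw [PySem.Int.bor_comm, PySem.Int.bor_zero]]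

theorem foldl_bor_merge (t : List Int) (f g : Int → Int) (init : Int) :
    t.foldl (fun u y => PySem.Int.bor u (PySem.Int.bor (f y) (g y))) init =
      t.foldl (fun u y => PySem.Int.bor u (g y))
        (t.foldl (fun u y => PySem.Int.bor u (f y)) init) := by
  induction t generalizing init with
  | nil => rfl
  | cons x s ih =>
    rw [List.foldl_cons, List.foldl_cons, List.foldl_cons, ih]
    congr 1
    rw [foldl_bor_pull s f (PySem.Int.bor init (PySem.Int.bor (f x) (g x))),
        foldl_bor_pull s f (PySem.Int.bor init (f x))]
    apply intTestBitExt; intro k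
    simp only [tb_bor]
    cases init.testBit k <;> cases (f x).testBit k <;> cases (g x).testBit k <;>
      cases (s.foldl (fun u y => PySem.Int.bor u (f y)) 0).testBit k <;> rfl

theorem altFold_fst (l : List Int) (a o : Int) :
    (l.foldl
      (fun (s : Int × Int) m => (PySem.Int.bor s.1 m, PySem.Int.bor s.2 (PySem.Int.band s.1 m)))
      (a, o)).1 = l.foldl (fun u m => PySem.Int.bor u m) a := by
  induction l generalizing a o with
  | nil => rfl
  | cons x s ih => exact ih _ _

theorem altFold_snd (l : List Int) (a o : Int) :
    (l.foldl
      (fun (s : Int × Int) m => (PySem.Int.bor s.1 m, PySem.Int.bor s.2 (PySem.Int.band s.1 m)))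
      (a, o)).2 = pairAux l (l.foldl (fun u y => PySem.Int.bor u (PySem.Int.band a y)) o) := by
  induction l generalizing a o with
  | nil => rfl
  | cons x t ih =>
    rw [List.foldl_cons, ih]
    show pairAux t _ = pairAux (x :: t) _
    rw [pairAux, List.foldl_cons]
    congr 1
    have hfun : (fun (u y : Int) => PySem.Int.bor u (PySem.Int.band (PySem.Int.bor a x) y))
        = fun u y => PySem.Int.bor u (PySem.Int.bor (PySem.Int.band a y) (PySem.Int.band x y)) := by
      funext u y
      rw [band_bor_distrib]
    rw [hfun, foldl_bor_merge]

theorem foldl_band_zero (l : List Int) (o : Int) :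
    l.foldl (fun u y => PySem.Int.bor u (PySem.Int.band 0 y)) o = o := by
  induction l generalizing o with
  | nil => rfl
  | cons x s ih =>
    rw [List.foldl_cons, show PySem.Int.band 0 x = 0 from by
        rw [PySem.Int.band_comm, PySem.Int.band_zero],
      PySem.Int.bor_zero]
    exact ih o


theorem score_eq (c : List Int) : score_domains c = altScore c := by
  unfold score_domains altScore mask_popcount union_masks overlap_union_mask
  refine Prod.ext ?_ ?_
  · show (PySem.Int.bitCount _ : Int) = (PySem.Int.bitCount _ : Int)
    rw [altFold_fst]
  · show -(PySem.Int.bitCount _ : Int) = -(PySem.Int.bitCount _ : Int)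
    rw [altFold_snd, foldl_band_zero, overlapAux_eq_pairAux]

theorem sel_loop (L : List (List Int)) (b : List Int) :
    L.foldl selStep (some b, some (score_domains b)) =
      (some (L.foldl bestStep b), some (score_domains (L.foldl bestStep b))) := by
  induction L generalizing b with
  | nil => rfl
  | cons x t ih =>
    rw [List.foldl_cons, List.foldl_cons]
    have hstep : selStep (some b, some (score_domains b)) x =
        if pyPairGT (score_domains x) (score_domains b)
        then (some x, some (score_domains x)) else (some b, some (score_domains b)) := rfl
    have hbest : bestStep b x =
        if pyPairGT (score_domains x) (score_domains b) then x else b := by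
      rw [bestStep, score_eq x, score_eq b]
    rw [hstep, hbest]
    cases h : pyPairGT (score_domains x) (score_domains b) <;> simp [ih]

theorem main_sel (L : List (List Int)) :
    (match (L.foldl selStep ((none : Option (List Int)), (none : Option (Int × Int)))).1 with
     | some c => c
     | none => []) =
    (match L with
     | [] => []
     | c :: rest => rest.foldl bestStep c) := by
  cases L with
  | nil => rfl
  | cons c rest =>
    rw [List.foldl_cons]
    rw [show selStep (none, none) c = (some c, some (score_domains c)) from rfl, sel_loop]

-- ===== VERDICT (by name: the statement is the Claim_ definition above) =====
theorem select_domains_exact_bit_spec : Claim_equal_select_domains_exact_bit := by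
  intro cds n maxc hDom hPre
  obtain ⟨h1, h2, h3⟩ := hPre
  unfold Spec_select_domains_exact_bit select_domains_exact_bit select_domains_exact_bit_alt
  have hA1 : ¬ (n ≤ 0) := by omega
  cases maxc with
  | none =>
    simp only [if_neg hA1, if_neg (not_lt.mpr h2), Bool.false_eq_true, if_false]
    exact main_sel _
  | some m =>
    have hm : decide ((Nat.choose cds.length n.toNat : Int) > m) = false := by
      simpa using not_lt.mpr (h3 m rfl)
    simp only [if_neg hA1, if_neg (not_lt.mpr h2), hm, Bool.false_eq_true, if_false]
    exact main_sel _
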